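-- pv_equiv track=rewrite | github.com/isaacsun0813/scripts | algorithms/boarding_airplanes.py | steffen_boarding
-- ===== SOURCE A (Python) =====
-- def steffen_boarding(empty_plane):
--     # Randomly create a list of imaginary passengers with their row and seat
--     passengers = []
--     for row in range(len(empty_plane)):
--         for col in range(len(empty_plane[row])):
--             passengers.append((row, col))
--
--     # Divide passengers into window, middle, and aisle groups
--     window_seats = [(row, col) for (row, col) in passengers if col in [0, 5]]
--     middle_seats = [(row, col) for (row, col) in passengers if col in [1, 4]]
--     aisle_seats = [(row, col) for (row, col) in passengers if col in [2, 3]]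
--
--     # Step 3: Sort each group back-to-front and alternate odd/even rows
--     def steffen_sort(seats):
--         back_to_front = sorted(seats, key=lambda x: -x[0])
--         odd_rows = [seat for seat in back_to_front if seat[0] % 2 == 1]
--         even_rows = [seat for seat in back_to_front if seat[0] % 2 == 0]
--         return odd_rows + even_rows
--
--     window_order = steffen_sort(window_seats)
--     middle_order = steffen_sort(middle_seats)
--     aisle_order = steffen_sort(aisle_seats)
--
--     # Combine our boarding order here
--     boarding_order = window_order + middle_order + aisle_order
--     return boarding_order
-- ===== SOURCE B (Python) =====
-- def steffen_boarding(empty_plane):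
--     # Single traversal, no sorting: visit odd rows back-to-front, then even rows
--     # back-to-front, once per seat group (window, middle, aisle).
--     n = len(empty_plane)
--     rows = [r for r in reversed(range(n)) if r % 2 == 1] + \
--            [r for r in reversed(range(n)) if r % 2 == 0]
--     boarding_order = []
--     for group in ([0, 5], [1, 4], [2, 3]):
--         for r in rows:
--             for c in group:
--                 if c < len(empty_plane[r]):
--                     boarding_order.append((r, c))
--     return boarding_order
-- ===== Notes on version B (the rewrite author's own statement) =====
-- stated objective: faster
-- what changed: B generates the boarding order directly by one traversal (odd rows back-to-front, then even rows, once per seat group), instead of materialising all passengers, filtering into three groups and stably sorting each group.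
import Mathlib
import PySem

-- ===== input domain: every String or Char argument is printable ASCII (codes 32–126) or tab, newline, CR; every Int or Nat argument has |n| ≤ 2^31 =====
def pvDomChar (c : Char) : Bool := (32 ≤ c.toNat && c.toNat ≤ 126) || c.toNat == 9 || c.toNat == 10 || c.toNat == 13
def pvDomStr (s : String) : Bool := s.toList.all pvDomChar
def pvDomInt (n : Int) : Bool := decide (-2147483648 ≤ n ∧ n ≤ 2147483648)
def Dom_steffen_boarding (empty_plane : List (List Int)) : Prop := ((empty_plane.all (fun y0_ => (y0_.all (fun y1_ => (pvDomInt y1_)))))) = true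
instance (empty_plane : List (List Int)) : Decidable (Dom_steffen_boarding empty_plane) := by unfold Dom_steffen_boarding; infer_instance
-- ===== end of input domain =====

-- B replaces "enumerate all seats, filter into three column groups, stable-sort each
-- group" by a direct traversal (odd rows back-to-front, then even rows, per group);
-- both return the same boarding order.

-- ===== PORT A =====
-- steffen_sort: stable sort back-to-front, then odd rows before even rows
def steffenSortA (seats : List (Int × Int)) : List (Int × Int) :=
  let back_to_front := PySem.List.sorted seats (fun x => -x.1)
  let odd_rows := back_to_front.filter (fun seat => PySem.Int.mod seat.1 2 == 1)
  let even_rows := back_to_front.filter (fun seat => PySem.Int.mod seat.1 2 == 0)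
  odd_rows ++ even_rows

def steffen_boarding (empty_plane : List (List Int)) : List (Int × Int) :=
  let passengers : List (Int × Int) :=
    (List.range empty_plane.length).flatMap (fun row =>
      (List.range (empty_plane.getD row []).length).map (fun (col : Nat) => ((row : Int), (col : Int))))
  let window_seats := passengers.filter (fun x => x.2 == 0 || x.2 == 5)
  let middle_seats := passengers.filter (fun x => x.2 == 1 || x.2 == 4)
  let aisle_seats := passengers.filter (fun x => x.2 == 2 || x.2 == 3)
  let window_order := steffenSortA window_seats
  let middle_order := steffenSortA middle_seats
  let aisle_order := steffenSortA aisle_seats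
  window_order ++ middle_order ++ aisle_order

-- ===== PORT B =====
def steffen_boarding_alt (empty_plane : List (List Int)) : List (Int × Int) :=
  let n := empty_plane.length
  let rows : List Nat :=
    ((List.range n).reverse.filter (fun r => r % 2 == 1)) ++
    ((List.range n).reverse.filter (fun r => r % 2 == 0))
  ([[0, 5], [1, 4], [2, 3]] : List (List Nat)).flatMap (fun group =>
    rows.flatMap (fun r =>
      (group.filter (fun c => c < (empty_plane.getD r []).length)).map
        (fun (c : Nat) => ((r : Int), (c : Int)))))

-- ===== PRECONDITION & SPEC =====
def Spec_steffen_boarding (empty_plane : List (List Int)) (out : List (Int × Int)) : Prop := out = steffen_boarding_alt empty_plane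
instance (empty_plane : List (List Int)) (out : List (Int × Int)) : Decidable (Spec_steffen_boarding empty_plane out) := by unfold Spec_steffen_boarding; infer_instance

-- ===== CLAIM (what is proved, stated in full; the proofs are below) =====
def Claim_equal_steffen_boarding : Prop := ∀ (empty_plane : List (List Int)), Dom_steffen_boarding empty_plane → Spec_steffen_boarding empty_plane (steffen_boarding empty_plane)

-- ===== LEMMAS AND PROOFS =====

-- inserting a row-N element into "done (all row N) ++ old (all rows < N)" puts it
-- right after done (stability of the insertion sort)
lemma pv_ins_one (N : Int) (x : Int × Int) (done old : List (Int × Int))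
    (hx : x.1 = N) (hd : ∀ y ∈ done, y.1 = N) (ho : ∀ y ∈ old, y.1 < N) :
    PySem.List.insertBy (fun a b => decide (-(a.1) < -(b.1))) x (done ++ old)
      = done ++ x :: old := by
  induction done with
  | nil =>
    cases old with
    | nil => simp [PySem.List.insertBy]
    | cons y ys =>
      have hy : y.1 < N := ho y (by simp)
      have hc : (decide (-(x.1) < -(y.1))) = true := by simp; omega
      simp only [List.nil_append, PySem.List.insertBy, hc, if_true]
  | cons d ds ih =>
    have hdN : d.1 = N := hd d (by simp)
    have hc : (decide (-(x.1) < -(d.1))) = false := by simp; omega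
    simp only [List.cons_append, PySem.List.insertBy, hc, Bool.false_eq_true, if_false]
    rw [ih (fun y hy => hd y (by simp [hy]))]

lemma pv_ins_block (N : Int) (block : List (Int × Int))
    (hb : ∀ x ∈ block, x.1 = N) :
    ∀ (done old : List (Int × Int)), (∀ y ∈ done, y.1 = N) → (∀ y ∈ old, y.1 < N) →
    block.foldl (fun acc x => PySem.List.insertBy (fun a b => decide (-(a.1) < -(b.1))) x acc)
        (done ++ old) = done ++ block ++ old := by
  induction block with
  | nil => intro done old _ _; simp
  | cons x bs ih =>
    intro done old hd ho
    have hx : x.1 = N := hb x (by simp)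
    have h1 := pv_ins_one N x done old hx hd ho
    simp only [List.foldl_cons, h1]
    have h2 := ih (fun y hy => hb y (by simp [hy])) (done ++ [x]) old
      (by intro y hy; rcases List.mem_append.1 hy with h | h
          · exact hd y h
          · simp at h; subst h; exact hx) ho
    simpa using h2

-- the stable sort by descending row of blocks listed in ascending row order is
-- exactly the blocks in reverse order
lemma pv_sorted_flatMap (B : Nat → List (Int × Int))
    (h : ∀ r x, x ∈ B r → x.1 = (r : Int)) :
    ∀ n, PySem.List.sorted ((List.range n).flatMap B) (fun x => -x.1)
      = ((List.range n).reverse).flatMap B := by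
  intro n
  rw [PySem.List.sorted_eq_foldl_insertBy]
  induction n with
  | zero => simp
  | succ n ih =>
    rw [List.range_succ, List.flatMap_append, List.foldl_append, ih]
    have hstep := pv_ins_block ((n : Int)) (B n) (fun x hx => h n x hx)
      [] ((List.range n).reverse.flatMap B) (by simp)
      (by
        intro y hy
        rcases List.mem_flatMap.1 hy with ⟨r, hr, hyr⟩
        have hrn : r < n := by
          have := List.mem_reverse.1 hr; exact List.mem_range.1 this
        have := h r y hyr
        omega)
    simp only [List.nil_append] at hstep
    simp only [List.flatMap_cons, List.flatMap_nil, List.append_nil,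
      List.reverse_append, List.reverse_cons, List.reverse_nil, List.nil_append,
      List.flatMap_append]
    exact hstep

-- filter distributes over flatMap and keeps/drops whole row blocks when the
-- predicate is constant on each block
lemma pv_flatMap_filter_row (rows : List Nat) (F : Nat → List (Int × Int))
    (p : Nat → Bool) (q : Int × Int → Bool)
    (h : ∀ r x, x ∈ F r → q x = p r) :
    (rows.flatMap F).filter q = (rows.filter p).flatMap F := by
  induction rows with
  | nil => simp
  | cons r rs ih =>
    simp only [List.flatMap_cons, List.filter_append, List.filter_cons, ih]
    by_cases hp : p r = true
    · rw [List.filter_eq_self.2 (fun x hx => by rw [h r x hx]; exact hp)]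
      simp [hp]
    · have hp' : p r = false := by revert hp; cases p r <;> simp
      rw [List.filter_eq_nil_iff.2 (fun x hx => by rw [h r x hx, hp']; simp)]
      simp [hp']

-- ascending scan of range m for columns {a,b} (a < b) = [a,b] kept while < m
lemma pv_range_filter_two (a b : Nat) (hab : a < b) :
    ∀ m, (List.range m).filter (fun (c : Nat) => ((c : Int) == (a : Int)) || ((c : Int) == (b : Int)))
      = [a, b].filter (fun c => c < m) := by
  intro m
  induction m with
  | zero => simp
  | succ m ih =>
    rw [List.range_succ, List.filter_append, ih]
    simp only [List.filter_cons, List.filter_nil, decide_eq_true_eq]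
    split_ifs <;> simp_all <;> omega

-- one column group, full pipeline of A = B's direct traversal of that group
lemma pv_group (empty_plane : List (List Int)) (a b : Nat) (hab : a < b) :
    steffenSortA
      (((List.range empty_plane.length).flatMap (fun row =>
        (List.range (empty_plane.getD row []).length).map (fun (col : Nat) => ((row : Int), (col : Int))))).filter
        (fun x => x.2 == (a : Int) || x.2 == (b : Int)))
      = (((List.range empty_plane.length).reverse.filter (fun r => r % 2 == 1)) ++
         ((List.range empty_plane.length).reverse.filter (fun r => r % 2 == 0))).flatMap
          (fun r => (([a, b].filter (fun c => c < (empty_plane.getD r []).length))).map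
            (fun (c : Nat) => ((r : Int), (c : Int)))) := by
  set n := empty_plane.length with hn
  set F : Nat → List (Int × Int) := fun r =>
    ([a, b].filter (fun c => c < (empty_plane.getD r []).length)).map
      (fun (c : Nat) => ((r : Int), (c : Int))) with hF
  have hFrow : ∀ r x, x ∈ F r → x.1 = (r : Int) := by
    intro r x hx
    rcases List.mem_map.1 hx with ⟨c, _, rfl⟩
    rfl
  -- step 1: the filtered passenger list is the ascending flatMap of F
  have hfilter :
      (((List.range n).flatMap (fun row =>
        (List.range (empty_plane.getD row []).length).map (fun (col : Nat) => ((row : Int), (col : Int))))).filter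
        (fun x => x.2 == (a : Int) || x.2 == (b : Int)))
      = (List.range n).flatMap F := by
    induction (List.range n) with
    | nil => simp
    | cons r rs ih =>
      simp only [List.flatMap_cons, List.filter_append, ih]
      congr 1
      rw [List.filter_map]
      simp only [hF]
      rw [show ((fun x : Int × Int => x.2 == (a : Int) || x.2 == (b : Int)) ∘
            (fun col : Nat => ((r : Int), (col : Int))))
          = (fun c : Nat => ((c : Int) == (a : Int)) || ((c : Int) == (b : Int))) from rfl]
      rw [pv_range_filter_two a b hab]
  rw [hfilter]
  -- step 2: the stable sort reverses the row blocks
  show steffenSortA ((List.range n).flatMap F) = _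
  unfold steffenSortA
  dsimp only
  rw [pv_sorted_flatMap F hFrow n]
  -- step 3: the parity filters pick whole row blocks
  have hodd : ∀ r x, x ∈ F r →
      (PySem.Int.mod x.1 2 == 1) = (r % 2 == 1) := by
    intro r x hx
    rw [hFrow r x hx]
    rw [show ((2 : Int)) = ((2 : Nat) : Int) from rfl, PySem.Int.mod_natCast]
    rcases Nat.mod_two_eq_zero_or_one r with h | h <;> simp [h]
  have heven : ∀ r x, x ∈ F r →
      (PySem.Int.mod x.1 2 == 0) = (r % 2 == 0) := by
    intro r x hx
    rw [hFrow r x hx]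
    rw [show ((2 : Int)) = ((2 : Nat) : Int) from rfl, PySem.Int.mod_natCast]
    rcases Nat.mod_two_eq_zero_or_one r with h | h <;> simp [h]
  rw [pv_flatMap_filter_row _ F _ _ hodd, pv_flatMap_filter_row _ F _ _ heven,
    ← List.flatMap_append]

-- ===== VERDICT (by name: the statement is the Claim_ definition above) =====
theorem steffen_boarding_spec : Claim_equal_steffen_boarding := by
  intro empty_plane _
  unfold Spec_steffen_boarding
  unfold steffen_boarding steffen_boarding_alt
  dsimp only
  simp only [List.flatMap_cons, List.flatMap_nil, List.append_nil]
  have h05 := pv_group empty_plane 0 5 (by omega)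
  have h14 := pv_group empty_plane 1 4 (by omega)
  have h23 := pv_group empty_plane 2 3 (by omega)
  simp only [Nat.cast_ofNat, Nat.cast_zero, Nat.cast_one] at h05 h14 h23
  rw [h05, h14, h23, List.append_assoc]
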